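-- pv_equiv track=rewrite | github.com/vytr09/multi-agent-siem-framework | agents/extractor/agent.py | _extract_attack_chain
-- ===== SOURCE A (Python) =====
-- from typing import Dict, Any, List, Optional
--
-- def _extract_attack_chain(ttps: List[Dict]) -> List[str]:
--     """Reconstruct attack chain from TTPs"""
--     tactic_order = {
--         "reconnaissance": 1, "resource development": 2, "initial access": 3,
--         "execution": 4, "persistence": 5, "privilege escalation": 6,
--         "defense evasion": 7, "credential access": 8, "discovery": 9,
--         "lateral movement": 10, "collection": 11, "command and control": 12,
--         "exfiltration": 13, "impact": 14
--     }
--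
--     sorted_ttps = sorted(
--         ttps,
--         key=lambda x: tactic_order.get(x.get("tactic", "").lower(), 99)
--     )
--
--     chain = []
--     seen = set()
--
--     for ttp in sorted_ttps:
--         attack_id = ttp.get("attack_id")
--         if attack_id and attack_id != "UNMAPPED" and attack_id not in seen:
--             chain.append(attack_id)
--             seen.add(attack_id)
--
--     return chain
-- ===== SOURCE B (Python) =====
-- from typing import Dict, Any, List, Optional
--
-- def _extract_attack_chain(ttps: List[Dict]) -> List[str]:
--     """Reconstruct attack chain from TTPs: distribute attack ids into 15 fixed
--     buckets (tactic position, unknown last) in one pass, then dedup the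
--     concatenated buckets in a second pass; no comparison sort, no per-element
--     dict of orders."""
--     tactics = ["reconnaissance", "resource development", "initial access",
--                "execution", "persistence", "privilege escalation",
--                "defense evasion", "credential access", "discovery",
--                "lateral movement", "collection", "command and control",
--                "exfiltration", "impact"]
--
--     buckets = [[] for _ in range(15)]
--     for ttp in ttps:
--         attack_id = ttp.get("attack_id")
--         if not attack_id or attack_id == "UNMAPPED":
--             continue
--         name = ttp.get("tactic", "").lower()
--         idx = tactics.index(name) if name in tactics else 14
--         buckets[idx].append(attack_id)
--
--     chain = []
--     seen = set()
--     for bucket in buckets: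
--         for attack_id in bucket:
--             if attack_id not in seen:
--                 seen.add(attack_id)
--                 chain.append(attack_id)
--     return chain
-- ===== Notes on version B (the rewrite author's own statement) =====
-- stated objective: alternative
-- what changed: Replaces the comparison sorted() plus fused dedup loop by a two-phase bucket distribution: one pass drops each (pre-filtered) attack id into one of 15 fixed position buckets (tactic's position in a plain list, unknown tactics last), then a second pass dedups the concatenated buckets; no sort and no order dict.
import Mathlib
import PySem

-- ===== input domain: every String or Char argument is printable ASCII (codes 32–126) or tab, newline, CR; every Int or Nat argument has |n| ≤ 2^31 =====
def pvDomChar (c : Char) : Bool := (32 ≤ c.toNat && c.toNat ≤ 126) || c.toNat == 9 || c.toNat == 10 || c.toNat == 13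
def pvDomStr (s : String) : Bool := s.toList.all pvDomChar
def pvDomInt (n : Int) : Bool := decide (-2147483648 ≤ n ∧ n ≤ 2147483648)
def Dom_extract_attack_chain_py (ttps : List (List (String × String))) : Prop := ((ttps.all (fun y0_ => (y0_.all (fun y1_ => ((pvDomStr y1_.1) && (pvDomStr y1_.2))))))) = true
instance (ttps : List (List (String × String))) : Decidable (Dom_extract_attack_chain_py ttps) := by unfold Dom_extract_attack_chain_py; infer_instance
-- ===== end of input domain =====

-- B replaces the comparison sort + fused dedup by a two-phase bucket distribution over 15 fixed position buckets, then a separate dedup pass over the concatenated buckets; objective: alternative.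


-- ===== PORT A =====
-- the literal tactic_order dict of A
def pvTacticOrderA : PySem.Dict String Int := PySem.Dict.ofList
  [("reconnaissance", 1), ("resource development", 2), ("initial access", 3),
   ("execution", 4), ("persistence", 5), ("privilege escalation", 6),
   ("defense evasion", 7), ("credential access", 8), ("discovery", 9),
   ("lateral movement", 10), ("collection", 11), ("command and control", 12),
   ("exfiltration", 13), ("impact", 14)]

-- the sort key:  tactic_order.get(x.get("tactic", "").lower(), 99)
def pvKeyA (ttp : List (String × String)) : Int :=
  pvTacticOrderA.getD (PySem.Str.lower ((PySem.Dict.mk ttp).getD "tactic" "")) 99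

-- the loop body: attack_id = ttp.get("attack_id"); if attack_id and … : append + add
def pvStepA (st : List String × PySem.Set String) (ttp : List (String × String)) :
    List String × PySem.Set String :=
  match (PySem.Dict.mk ttp).get? "attack_id" with
  | none => st
  | some aid =>
      if aid ≠ "" ∧ aid ≠ "UNMAPPED" ∧ aid ∉ st.2 then
        (st.1 ++ [aid], PySem.Set.add st.2 aid)
      else st

def extract_attack_chain_py (ttps : List (List (String × String))) : List String :=
  let sorted_ttps := PySem.List.sorted ttps pvKeyA false
  (sorted_ttps.foldl pvStepA ([], PySem.Set.empty)).1

-- ===== PORT B =====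
-- the plain tactics list of B (position = bucket index)
def pvTacticsB : List String :=
  ["reconnaissance", "resource development", "initial access",
   "execution", "persistence", "privilege escalation",
   "defense evasion", "credential access", "discovery",
   "lateral movement", "collection", "command and control",
   "exfiltration", "impact"]

-- idx = tactics.index(name) if name in tactics else 14
def pvBidxB (ttp : List (String × String)) : Nat :=
  match PySem.List.index? pvTacticsB (PySem.Str.lower ((PySem.Dict.mk ttp).getD "tactic" "")) with
  | some i => i
  | none => 14

-- the distribution loop body: early-continue on falsy / "UNMAPPED" ids, then buckets[idx].append
def pvDistribB (buckets : List (List String)) (ttp : List (String × String)) :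
    List (List String) :=
  match (PySem.Dict.mk ttp).get? "attack_id" with
  | none => buckets
  | some aid =>
      if aid = "" ∨ aid = "UNMAPPED" then buckets
      else buckets.modify (pvBidxB ttp) (· ++ [aid])

-- the dedup pass body
def pvDedupB (st : List String × PySem.Set String) (aid : String) :
    List String × PySem.Set String :=
  if aid ∈ st.2 then st else (st.1 ++ [aid], PySem.Set.add st.2 aid)

def extract_attack_chain_py_alt (ttps : List (List (String × String))) : List String :=
  let buckets := ttps.foldl pvDistribB (List.replicate 15 [])
  (buckets.foldl (fun st bucket => bucket.foldl pvDedupB st) ([], PySem.Set.empty)).1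

-- ===== PRECONDITION & SPEC =====
def Spec_extract_attack_chain_py (ttps : List (List (String × String))) (out : List String) : Prop := out = extract_attack_chain_py_alt ttps
instance (ttps : List (List (String × String))) (out : List String) : Decidable (Spec_extract_attack_chain_py ttps out) := by unfold Spec_extract_attack_chain_py; infer_instance

-- ===== CLAIM (what is proved, stated in full; the proofs are below) =====
def Claim_equal_extract_attack_chain_py : Prop := ∀ (ttps : List (List (String × String))), Dom_extract_attack_chain_py ttps → Spec_extract_attack_chain_py ttps (extract_attack_chain_py ttps)

-- ===== LEMMAS AND PROOFS =====

-- proof-side: the attack id a ttp contributes, if any (A's guard = B's early continue)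
def pvExtId (ttp : List (String × String)) : Option String :=
  ((PySem.Dict.mk ttp).get? "attack_id").filter (fun a => decide ¬ (a = "" ∨ a = "UNMAPPED"))

-- the order value sitting at bucket index i
def pvOrdOf (i : Nat) : Int := if i < 14 then (i : Int) + 1 else 99

def pvOrdersList : List Int := PySem.List.pyRange 1 15 1 ++ [99]

lemma pvOrders_eq_map : pvOrdersList = (List.range 15).map pvOrdOf := by decide

lemma pvOrders_pairwise : pvOrdersList.Pairwise (· < ·) := by decide

lemma pvBidx_lt (ttp : List (String × String)) : pvBidxB ttp < 15 := by
  unfold pvBidxB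
  cases h : PySem.List.index? pvTacticsB (PySem.Str.lower ((PySem.Dict.mk ttp).getD "tactic" "")) with
  | none => show (14:Nat) < 15; decide
  | some i =>
      obtain ⟨hk, -, -⟩ := PySem.List.getElem_of_index?_eq_some h
      have hl : pvTacticsB.length = 14 := by decide
      show i < 15
      omega

-- A's sort key is the order value at B's bucket index
lemma pvKey_eq_ordOf (ttp : List (String × String)) :
    pvKeyA ttp = pvOrdOf (pvBidxB ttp) := by
  unfold pvKeyA pvBidxB
  generalize PySem.Str.lower ((PySem.Dict.mk ttp).getD "tactic" "") = s
  cases h : PySem.List.index? pvTacticsB s with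
  | none =>
      have hnm : s ∉ pvTacticsB := (PySem.List.index?_eq_none_iff _ _).mp h
      have hkeys : pvTacticOrderA.keys = pvTacticsB := by decide
      have hnone : pvTacticOrderA.get? s = none := by
        rw [PySem.Dict.get?_eq_none_iff_not_mem_keys, hkeys]; exact hnm
      show pvTacticOrderA.getD s 99 = pvOrdOf 14
      rw [PySem.Dict.getD_eq_get?_getD, hnone]
      decide
  | some i =>
      obtain ⟨hk, heq, -⟩ := PySem.List.getElem_of_index?_eq_some h
      have hlen : pvTacticsB.length = 14 := by decide
      rw [hlen] at hk
      show pvTacticOrderA.getD s 99 = pvOrdOf i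
      interval_cases i <;>
        (simp only [pvTacticsB, List.getElem_cons_zero, List.getElem_cons_succ] at heq;
         subst heq; decide)

lemma pvKey_mem_orders (ttp : List (String × String)) : pvKeyA ttp ∈ pvOrdersList := by
  rw [pvKey_eq_ordOf, pvOrders_eq_map]
  exact List.mem_map_of_mem (List.mem_range.mpr (pvBidx_lt ttp))

lemma pvOrdOf_inj {i j : Nat} (hi : i < 15) (hj : j < 15) (h : pvOrdOf i = pvOrdOf j) :
    i = j := by
  unfold pvOrdOf at h
  split_ifs at h <;> omega

-- insertBy passes over a prefix it does not go before
lemma pv_insertBy_append_left {α : Type} (before : α → α → Bool) (x : α) (l1 l2 : List α)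
    (h : ∀ y ∈ l1, before x y = false) :
    PySem.List.insertBy before x (l1 ++ l2) = l1 ++ PySem.List.insertBy before x l2 := by
  induction l1 with
  | nil => simp
  | cons y ys ih =>
      have hy := h y (by simp)
      simp [PySem.List.insertBy, hy, ih (fun z hz => h z (by simp [hz]))]

-- insertBy goes in front when everything compares after x
lemma pv_insertBy_all_before {α : Type} (before : α → α → Bool) (x : α) (l : List α)
    (h : ∀ y ∈ l, before x y = true) :
    PySem.List.insertBy before x l = x :: l := by
  cases l with
  | nil => rfl
  | cons y ys => simp [PySem.List.insertBy, h y (by simp)]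

lemma pv_flatMap_congr {α β : Type} (l : List α) (f g : α → List β)
    (h : ∀ a ∈ l, f a = g a) : l.flatMap f = l.flatMap g := by
  induction l with
  | nil => rfl
  | cons a l ih => simp [List.flatMap_cons, h a (by simp), ih (fun b hb => h b (by simp [hb]))]

-- inserting x into the bucket decomposition of ys appends x to its bucket
lemma pv_insertBy_flatMap {α : Type} (key : α → Int) (os : List Int)
    (hos : os.Pairwise (· < ·)) (x : α) (hx : key x ∈ os) (ys : List α) :
    PySem.List.insertBy (fun a b => decide (key a < key b)) x
        (os.flatMap (fun o => ys.filter (fun y => decide (key y = o)))) =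
      os.flatMap (fun o => (ys ++ [x]).filter (fun y => decide (key y = o))) := by
  induction os with
  | nil => cases hx
  | cons o os ih =>
      have hlt : ∀ o' ∈ os, o < o' := by
        intro o' ho'; exact (List.pairwise_cons.mp hos).1 o' ho'
      have htail := (List.pairwise_cons.mp hos).2
      by_cases hk : key x = o
      · have h1 : ∀ y ∈ ys.filter (fun y => decide (key y = o)),
            (fun a b => decide (key a < key b)) x y = false := by
          intro y hy
          have hyo : key y = o := of_decide_eq_true (List.mem_filter.mp hy).2
          simp [hyo, hk]
        have h2 : ∀ y ∈ os.flatMap (fun o' => ys.filter (fun y => decide (key y = o'))),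
            (fun a b => decide (key a < key b)) x y = true := by
          intro y hy
          rcases List.mem_flatMap.mp hy with ⟨o', ho', hyf⟩
          have hkey : key y = o' := of_decide_eq_true (List.mem_filter.mp hyf).2
          simp only [decide_eq_true_eq]
          rw [hk, hkey]; exact hlt o' ho'
        rw [List.flatMap_cons, pv_insertBy_append_left _ _ _ _ h1,
            pv_insertBy_all_before _ _ _ h2, List.flatMap_cons]
        have hhead : (ys ++ [x]).filter (fun y => decide (key y = o)) =
            ys.filter (fun y => decide (key y = o)) ++ [x] := by
          simp [List.filter_append, hk]
        have hrest : os.flatMap (fun o' => (ys ++ [x]).filter (fun y => decide (key y = o'))) =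
            os.flatMap (fun o' => ys.filter (fun y => decide (key y = o'))) := by
          apply pv_flatMap_congr
          intro o' ho'
          have hne : key x ≠ o' := by have := hlt o' ho'; omega
          simp [List.filter_append, hne]
        rw [hhead, hrest]; simp
      · have hx' : key x ∈ os := by
          rcases hx with _ | h
          · exact absurd rfl hk
          · assumption
        have hgt : o < key x := hlt _ hx'
        have h1 : ∀ y ∈ ys.filter (fun y => decide (key y = o)),
            (fun a b => decide (key a < key b)) x y = false := by
          intro y hy
          have hyo : key y = o := of_decide_eq_true (List.mem_filter.mp hy).2
          simp only [decide_eq_false_iff_not, hyo]; omega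
        have hhead : (ys ++ [x]).filter (fun y => decide (key y = o)) =
            ys.filter (fun y => decide (key y = o)) := by
          simp [List.filter_append, hk]
        rw [List.flatMap_cons, pv_insertBy_append_left _ _ _ _ h1, ih htail hx',
            List.flatMap_cons, hhead]

-- the stable sort by key IS the bucket decomposition
lemma pv_sorted_eq_flatMap {α : Type} (key : α → Int) (os : List Int)
    (hos : os.Pairwise (· < ·)) (xs : List α) (hmem : ∀ x ∈ xs, key x ∈ os) :
    PySem.List.sorted xs key false =
      os.flatMap (fun o => xs.filter (fun y => decide (key y = o))) := by
  rw [PySem.List.sorted_eq_foldl_insertBy]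
  induction xs using List.reverseRecOn with
  | nil => simp
  | append_singleton ys x ih =>
      rw [List.foldl_append, List.foldl_cons, List.foldl_nil,
          ih (fun y hy => hmem y (by simp [hy])),
          pv_insertBy_flatMap key os hos x (hmem x (by simp)) ys]

-- A's fused loop over a list = the dedup pass over the ids that list contributes
lemma pvStepA_eq_dedup (xs : List (List (String × String)))
    (st : List String × PySem.Set String) :
    xs.foldl pvStepA st = (xs.filterMap pvExtId).foldl pvDedupB st := by
  induction xs generalizing st with
  | nil => rfl
  | cons t xs ih =>
      rw [List.foldl_cons]
      have hstep : pvStepA st t =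
          match pvExtId t with
          | none => st
          | some a => pvDedupB st a := by
        unfold pvStepA pvExtId pvDedupB
        cases h : (PySem.Dict.mk t).get? "attack_id" with
        | none => rfl
        | some a =>
            by_cases hg : a = "" ∨ a = "UNMAPPED"
            · have : ¬ (a ≠ "" ∧ a ≠ "UNMAPPED" ∧ a ∉ st.2) := by tauto
              simp [Option.filter, hg, this]
            · rw [not_or] at hg
              by_cases hm : a ∈ st.2
              · simp [Option.filter, hg, hm]
              · simp [Option.filter, hg, hm]
      cases h : pvExtId t with
      | none => rw [ih]; simp [h, hstep]
      | some a => rw [ih]; simp [h, hstep]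

-- B's distribution step, expressed through the contributed id
lemma pvDistrib_eq (bs : List (List String)) (t : List (String × String)) :
    pvDistribB bs t = match pvExtId t with
      | none => bs
      | some a => bs.modify (pvBidxB t) (· ++ [a]) := by
  unfold pvDistribB pvExtId
  cases h : (PySem.Dict.mk t).get? "attack_id" with
  | none => rfl
  | some a =>
      by_cases hg : a = "" ∨ a = "UNMAPPED" <;> simp [Option.filter, hg]

-- B's distribution loop, characterised bucket by bucket
lemma pvDistrib_invariant (xs : List (List (String × String)))
    (bs : List (List String)) (hlen : bs.length = 15) :
    xs.foldl pvDistribB bs =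
      (List.range 15).map (fun i =>
        bs[i]! ++ (xs.filter (fun t => decide (pvBidxB t = i))).filterMap pvExtId) := by
  induction xs generalizing bs with
  | nil =>
      simp only [List.foldl_nil, List.filter_nil, List.filterMap_nil, List.append_nil]
      apply List.ext_getElem
      · simp [hlen]
      · intro i h1 h2
        simp only [List.length_map, List.length_range] at h2
        simp only [List.getElem_map, List.getElem_range]
        exact (getElem!_pos bs i (by omega)).symm
  | cons t xs ih =>
      rw [List.foldl_cons, pvDistrib_eq]
      have hbt := pvBidx_lt t
      cases h : pvExtId t with
      | none =>
          rw [ih bs hlen]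
          apply List.map_congr_left
          intro i hi
          by_cases hb : pvBidxB t = i
          · rw [List.filter_cons_of_pos (by simp [hb]), List.filterMap_cons, h]
          · rw [List.filter_cons_of_neg (by simp [hb])]
      | some a =>
          have hlen' : (bs.modify (pvBidxB t) (· ++ [a])).length = 15 := by
            simp [List.length_modify, hlen]
          rw [ih _ hlen']
          apply List.map_congr_left
          intro i hi
          simp only [List.mem_range] at hi
          have hmod : (bs.modify (pvBidxB t) (· ++ [a]))[i]! =
              if pvBidxB t = i then bs[i]! ++ [a] else bs[i]! := by
            rw [getElem!_pos _ i (by omega), getElem!_pos bs i (by omega),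
                List.getElem_modify]
          rw [hmod]
          by_cases hb : pvBidxB t = i
          · rw [if_pos hb, List.filter_cons_of_pos (by simp [hb]), List.filterMap_cons, h]
            exact List.append_assoc _ _ _
          · rw [if_neg hb, List.filter_cons_of_neg (by simp [hb])]

-- folding over a flatMap is the nested fold
lemma pv_foldl_flatMap {α β σ : Type} (l : List α) (g : α → List β)
    (f : σ → β → σ) (init : σ) :
    (l.flatMap g).foldl f init = l.foldl (fun st a => (g a).foldl f st) init := by
  induction l generalizing init with
  | nil => rfl
  | cons a l ih => simp [List.flatMap_cons, List.foldl_append, ih]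

-- filterMap distributes over the bucket decomposition
lemma pv_filterMap_flatMap {α β γ : Type} (l : List α) (g : α → List β) (f : β → Option γ) :
    (l.flatMap g).filterMap f = l.flatMap (fun a => (g a).filterMap f) := by
  induction l with
  | nil => rfl
  | cons a l ih => simp [List.flatMap_cons, List.filterMap_append, ih]

-- ===== VERDICT (by name: the statement is the Claim_ definition above) =====
theorem extract_attack_chain_py_spec : Claim_equal_extract_attack_chain_py := by
  intro ttps _
  unfold Spec_extract_attack_chain_py extract_attack_chain_py extract_attack_chain_py_alt
  show (List.foldl pvStepA ([], PySem.Set.empty) (PySem.List.sorted ttps pvKeyA false)).1 =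
    (List.foldl (fun st bucket => bucket.foldl pvDedupB st) ([], PySem.Set.empty)
      (ttps.foldl pvDistribB (List.replicate 15 []))).1
  rw [pv_sorted_eq_flatMap pvKeyA pvOrdersList pvOrders_pairwise ttps
        (fun x _ => pvKey_mem_orders x),
      pvStepA_eq_dedup, pv_filterMap_flatMap, pv_foldl_flatMap,
      pvDistrib_invariant ttps (List.replicate 15 []) (by decide),
      List.foldl_map, pvOrders_eq_map, List.foldl_map]
  congr 1
  apply PySem.List.foldl_congr_mem
  intro st i hi
  simp only [List.mem_range] at hi
  have hrep : (List.replicate 15 ([] : List String))[i]! = [] := by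
    rw [getElem!_pos _ i (by simpa using hi), List.getElem_replicate]
  rw [hrep, List.nil_append]
  congr 2
  apply List.filter_congr
  intro y _
  have hk := pvKey_eq_ordOf y
  have hby := pvBidx_lt y
  by_cases hb : pvBidxB y = i
  · simp [hk, hb]
  · have hne : pvOrdOf (pvBidxB y) ≠ pvOrdOf i := fun h => hb (pvOrdOf_inj hby hi h)
    simp [hk, hne, hb]
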